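-- pv_equiv track=rewrite | github.com/trettier/middle | ft_multi_num.py | ft_multi_num
-- ===== SOURCE A (Python) =====
-- def ft_multi_num(a):
--     n = 1
--     if a == 0:
--         n = 0
--     while a > 0:
--         n *= a % 10
--         a //= 10
--     return n
-- ===== SOURCE B (Python) =====
-- def ft_multi_num(a):
--     if a == 0:
--         return 0
--     if a < 0:
--         return 1
--     p = 1
--     for c in str(a):
--         p *= ord(c) - ord('0')
--     return p
-- ===== Notes on version B (the rewrite author's own statement) =====
-- stated objective: idiomatic
-- what changed: B handles the zero/negative cases up front and folds a product over the decimal string of a instead of peeling digits with modulo and floor division in a while loop.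
import Mathlib
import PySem

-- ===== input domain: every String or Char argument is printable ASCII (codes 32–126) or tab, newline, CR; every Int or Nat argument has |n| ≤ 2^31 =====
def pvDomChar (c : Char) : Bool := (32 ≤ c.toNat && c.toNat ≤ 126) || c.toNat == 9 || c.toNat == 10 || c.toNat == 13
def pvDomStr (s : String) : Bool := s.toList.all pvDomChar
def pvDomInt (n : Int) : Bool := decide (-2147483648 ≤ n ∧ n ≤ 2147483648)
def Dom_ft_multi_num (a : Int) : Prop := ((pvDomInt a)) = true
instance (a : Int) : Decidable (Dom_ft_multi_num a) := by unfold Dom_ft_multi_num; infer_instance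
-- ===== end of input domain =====

-- B replaces A's digit-peeling while-loop (modulo / floor division) by explicit zero/negative cases plus a product fold
-- over str(a); equivalence of the return values is proved for all integers.

-- ===== PORT A =====
-- the while loop of A (n accumulates the product while a is repeatedly floor-divided)
def ftLoopA (a n : Int) : Int :=
  if a > 0 then ftLoopA (PySem.Int.floordiv a 10) (n * PySem.Int.mod a 10) else n
  termination_by a.toNat
  decreasing_by
    rename_i h
    simp only [PySem.Int.floordiv, Int.fdiv_eq_ediv]
    omega

def ft_multi_num (a : Int) : Int :=
  let n : Int := if a = 0 then 0 else 1
  ftLoopA a n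

-- ===== PORT B =====
def ft_multi_num_alt (a : Int) : Int :=
  if a = 0 then 0
  else if a < 0 then 1
  else (PySem.Int.toChars a).foldl (fun p c => p * ((c.toNat : Int) - ('0'.toNat : Int))) 1

-- ===== PRECONDITION & SPEC =====
def Spec_ft_multi_num (a : Int) (out : Int) : Prop := out = ft_multi_num_alt a
instance (a : Int) (out : Int) : Decidable (Spec_ft_multi_num a out) := by unfold Spec_ft_multi_num; infer_instance

-- ===== CLAIM (what is proved, stated in full; the proofs are below) =====
def Claim_equal_ft_multi_num : Prop := ∀ (a : Int), Dom_ft_multi_num a → Spec_ft_multi_num a (ft_multi_num a)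

-- ===== LEMMAS AND PROOFS =====

-- product of the decimal digits of a natural number, most-significant digit last in the recursion
def prodD (m : Nat) : Int :=
  if m < 10 then (m : Int) else prodD (m / 10) * ((m % 10 : Nat) : Int)
  termination_by m
  decreasing_by omega

-- decimal digit characters, most significant first (= Nat.toDigits 10)
def digitsChars (m : Nat) : List Char :=
  if m < 10 then [Nat.digitChar m] else digitsChars (m / 10) ++ [Nat.digitChar (m % 10)]
  termination_by m
  decreasing_by omega

theorem digitChar_toNat {d : Nat} (h : d < 10) : ((Nat.digitChar d).toNat : Int) = 48 + d := by
  interval_cases d <;> decide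

theorem toDigitsCore_eq (f : Nat) : ∀ (n : Nat) (l : List Char), n < f →
    Nat.toDigitsCore 10 f n l = digitsChars n ++ l := by
  induction f with
  | zero => intro n l h; omega
  | succ f ih =>
    intro n l h
    by_cases h10 : n < 10
    · have hd : n / 10 = 0 := by omega
      rw [digitsChars]
      simp [Nat.toDigitsCore, hd, Nat.mod_eq_of_lt h10, h10]
    · have hd : ¬ n / 10 = 0 := by omega
      rw [digitsChars]
      simp only [Nat.toDigitsCore, hd, if_false]
      rw [ih (n / 10) _ (by omega)]
      simp [h10]

theorem toChars_pos {a : Int} (h : 0 < a) :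
    PySem.Int.toChars a = digitsChars a.toNat := by
  have hneg : ¬ a < 0 := by omega
  simp only [PySem.Int.toChars, hneg, if_false, Nat.toDigits]
  simpa using toDigitsCore_eq (a.toNat + 1) a.toNat [] (Nat.lt_succ_self _)

theorem foldl_digitsChars (m : Nat) : ∀ p : Int,
    (digitsChars m).foldl (fun p c => p * ((c.toNat : Int) - ('0'.toNat : Int))) p = p * prodD m := by
  induction m using Nat.strong_induction_on with
  | _ m ih =>
    intro p
    by_cases h : m < 10
    · rw [digitsChars, prodD]
      simp [h, digitChar_toNat h]
    · rw [digitsChars, prodD]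
      simp only [h, if_false, List.foldl_append, List.foldl_cons, List.foldl_nil]
      rw [ih (m / 10) (by omega) p, digitChar_toNat (Nat.mod_lt _ (by omega))]
      push_cast
      ring

theorem ftLoopA_pos (m : Nat) : ∀ (a n : Int), 0 < a → a.toNat = m →
    ftLoopA a n = n * prodD m := by
  induction m using Nat.strong_induction_on with
  | _ m ih =>
    intro a n ha hm
    rw [ftLoopA.eq_def]
    simp only [ha, if_pos]
    have hfd : PySem.Int.floordiv a 10 = (m / 10 : Nat) := by
      simp only [PySem.Int.floordiv, Int.fdiv_eq_ediv]; omega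
    have hmd : PySem.Int.mod a 10 = ((m % 10 : Nat) : Int) := by
      simp only [PySem.Int.mod, Int.fmod_eq_emod]; omega
    by_cases h10 : m < 10
    · have hz : (m / 10 : Nat) = 0 := by omega
      rw [hfd, hmd, hz, ftLoopA.eq_def, prodD]
      simp only [h10, if_pos]
      norm_num
      omega
    · have hp : prodD m = prodD (m / 10) * ((m % 10 : Nat) : Int) := by
        rw [prodD]; simp [h10]
      rw [hfd, hmd, ih (m / 10) (by omega) _ _ (by omega) (by omega), hp]
      ring

theorem ftLoopA_nonpos {a : Int} (n : Int) (h : ¬ a > 0) : ftLoopA a n = n := by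
  rw [ftLoopA.eq_def]; simp [h]

-- ===== VERDICT (by name: the statement is the Claim_ definition above) =====
theorem ft_multi_num_spec : Claim_equal_ft_multi_num := by
  intro a _
  unfold Spec_ft_multi_num ft_multi_num ft_multi_num_alt
  by_cases h0 : a = 0
  · simp [h0, ftLoopA_nonpos]
  · by_cases hneg : a < 0
    · simp [h0, hneg, ftLoopA_nonpos, not_lt.mpr (le_of_lt hneg)]
    · have hpos : 0 < a := by omega
      simp only [h0, if_false, hneg]
      rw [ftLoopA_pos a.toNat a 1 hpos rfl, toChars_pos hpos,
        foldl_digitsChars a.toNat 1]
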